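-- pv_equiv track=rewrite | github.com/korableva-daniela/python_3 | lab1/main.py | func_s5_2
-- ===== SOURCE A (Python) =====
-- def func_s5_2(mas):
--     min = mas[0]
--     j=0
--     for i in range(len(mas)):
--         if mas[i]<min:
--             min=mas[i]
--             j=i
--     if j==0:
--      return -1
--     else:
--         return mas[j-1]
-- ===== SOURCE B (Python) =====
-- def func_s5_2(mas):
--     # Pair every element with what precedes it (-1 for the head), then one min by value:
--     # min with key returns the FIRST minimal pair, whose companion is the answer directly.
--     candidates = [(mas[0], -1)] + [(cur, prev) for prev, cur in zip(mas, mas[1:])]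
--     return min(candidates, key=lambda c: c[0])[1]
-- ===== Notes on version B (the rewrite author's own statement) =====
-- stated objective: alternative
-- what changed: Instead of tracking the index of the running minimum and looking back into the list afterwards, B builds a predecessor-paired view via zip (each value paired with the element before it, a sentinel for the head) and takes a single min by value, whose companion component is the answer directly.
import Mathlib
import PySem

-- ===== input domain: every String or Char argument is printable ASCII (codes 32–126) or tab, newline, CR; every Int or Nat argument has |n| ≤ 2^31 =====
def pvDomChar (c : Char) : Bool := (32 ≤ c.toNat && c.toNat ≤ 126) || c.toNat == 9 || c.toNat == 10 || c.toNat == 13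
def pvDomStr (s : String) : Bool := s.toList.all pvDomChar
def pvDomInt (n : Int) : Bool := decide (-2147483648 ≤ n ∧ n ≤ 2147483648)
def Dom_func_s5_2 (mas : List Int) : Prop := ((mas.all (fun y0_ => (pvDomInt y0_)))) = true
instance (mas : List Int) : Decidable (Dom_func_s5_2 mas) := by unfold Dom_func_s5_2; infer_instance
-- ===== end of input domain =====

-- B replaces A's index-tracking minimum loop by a predecessor-paired view (value, element-before)
-- reduced by one min-by-value; equivalence of RETURN values, on non-empty lists (both raise on []).

-- ===== PORT A =====
-- A: track (min, j) over indices, then return -1 if j == 0 else mas[j-1]; mas[0] raises on [].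
def func_s5_2 (mas : List Int) : Int :=
  let m0 := PySem.List.pyGetD mas 0 0   -- mas[0]; in range under Pre_ (mas ≠ [])
  let st := (PySem.List.pyRange 0 (PySem.List.len mas) 1).foldl
    (fun (p : Int × Int) i =>
      if PySem.List.pyGetD mas i 0 < p.1 then (PySem.List.pyGetD mas i 0, i) else p)
    (m0, 0)
  if st.2 = 0 then -1 else PySem.List.pyGetD mas (st.2 - 1) 0

-- ===== PORT B =====
-- B: candidates = [(mas[0], -1)] + [(cur, prev) for prev, cur in zip(mas, mas[1:])];
--    return min(candidates, key=lambda c: c[0])[1]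
def func_s5_2_alt (mas : List Int) : Int :=
  match mas with
  | [] => 0          -- mas[0]: Python raises IndexError (excluded by Pre_)
  | x :: t =>
    let candidates : List (Int × Int) :=
      (x, (-1 : Int)) :: ((x :: t).zip t).map (fun p => (p.2, p.1))
    match PySem.List.min? candidates (fun c => c.1) with
    | none => 0      -- unreachable: candidates is non-empty
    | some c => c.2

-- ===== PRECONDITION & SPEC =====
-- Pre_ excludes only the empty list, on which both Pythons raise IndexError at mas[0].
def Pre_func_s5_2 (mas : List Int) : Prop := mas ≠ []
instance (mas : List Int) : Decidable (Pre_func_s5_2 mas) := by unfold Pre_func_s5_2; infer_instance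
def pvWitness_func_s5_2 : List Int := ([3, 1, 2])
def Spec_func_s5_2 (mas : List Int) (out : Int) : Prop := out = func_s5_2_alt mas
instance (mas : List Int) (out : Int) : Decidable (Spec_func_s5_2 mas out) := by unfold Spec_func_s5_2; infer_instance

-- ===== CLAIM (what is proved, stated in full; the proofs are below) =====
def Claim_equal_func_s5_2 : Prop := ∀ (mas : List Int), Dom_func_s5_2 mas → Pre_func_s5_2 mas → Spec_func_s5_2 mas (func_s5_2 mas)

-- ===== LEMMAS AND PROOFS =====

theorem pv_foldl_min_le (t : List Int) : ∀ (m : Int), t.foldl min m ≤ m := by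
  induction t with
  | nil => intro m; simp
  | cons v t ih =>
    intro m
    calc (v :: t).foldl min m = t.foldl min (min m v) := by simp [List.foldl]
    _ ≤ min m v := ih _
    _ ≤ m := min_le_left _ _

-- invariant of A's loop over the enumerated list: the state (m, j) becomes
-- (overall min, position of its first strict improvement) or is left unchanged
theorem pv_loopA (t : List Int) : ∀ (s m j : Int),
    (PySem.List.enumerate t s).foldl
      (fun (p : Int × Int) q => if q.2 < p.1 then (q.2, q.1) else p) (m, j)
    = if t.foldl min m < m
        then (t.foldl min m, s + (t.idxOf (t.foldl min m) : Int))
        else (m, j) := by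
  induction t with
  | nil => intro s m j; simp [PySem.List.enumerate]
  | cons v t ih =>
    intro s m j
    have hcons : PySem.List.enumerate (v :: t) s = (s, v) :: PySem.List.enumerate t (s + 1) := by
      simp [PySem.List.enumerate]
    rw [hcons]
    simp only [List.foldl_cons]
    by_cases hv : v < m
    · have hmin : min m v = v := min_eq_right (le_of_lt hv)
      simp only [hv, if_pos, hmin, ih (s + 1) v s]
      have hM : t.foldl min v ≤ v := pv_foldl_min_le t v
      by_cases h2 : t.foldl min v < v
      · have hne : t.foldl min v ≠ v := ne_of_lt h2
        have hlt : t.foldl min v < m := lt_trans h2 hv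
        rw [if_pos h2, if_pos hlt, List.idxOf_cons]
        have hbv : (v == t.foldl min v) = false := by
          simp only [beq_eq_false_iff_ne, ne_eq]; intro hh; exact hne hh.symm
        rw [hbv]
        simp only [cond_false]
        rw [Prod.mk.injEq]
        exact ⟨rfl, by push_cast; ring⟩
      · have hEq : t.foldl min v = v := le_antisymm hM (not_lt.mp h2)
        rw [if_neg h2, if_pos (show List.foldl min v t < m by rw [hEq]; exact hv), hEq, List.idxOf_cons]
        simp
    · have hmin : min m v = m := min_eq_left (not_lt.mp hv)
      simp only [hv, if_false, hmin, ih (s + 1) m j]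
      by_cases hM : t.foldl min m < m
      · have hlt : t.foldl min m < v := lt_of_lt_of_le hM (not_lt.mp hv)
        have hne : t.foldl min m ≠ v := ne_of_lt hlt
        rw [if_pos hM, if_pos hM, List.idxOf_cons]
        have hbv : (v == t.foldl min m) = false := by
          simp only [beq_eq_false_iff_ne, ne_eq]; intro hh; exact hne hh.symm
        rw [hbv]
        simp only [cond_false]
        rw [Prod.mk.injEq]
        exact ⟨rfl, by push_cast; ring⟩
      · rw [if_neg hM, if_neg hM]

-- one min?-fold step absorbed into the head candidate
theorem pv_min?_cons2 (c d : Int × Int) (l : List (Int × Int)) :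
    PySem.List.min? (c :: d :: l) (fun q => q.1)
    = PySem.List.min? ((if d.1 < c.1 then d else c) :: l) (fun q => q.1) := by
  by_cases h : d.1 < c.1 <;> simp [PySem.List.min?, List.foldl_cons, h]

-- invariant of B's min over the predecessor-paired candidates: the result is
-- (overall min, its predecessor in prev :: t) or the seed candidate c
theorem pv_loopB (t : List Int) : ∀ (prev : Int) (c : Int × Int),
    PySem.List.min? (c :: ((prev :: t).zip t).map (fun (p : Int × Int) => (p.2, p.1))) (fun q => q.1)
    = some (if t.foldl min c.1 < c.1
            then (t.foldl min c.1, (prev :: t).getD (t.idxOf (t.foldl min c.1)) 0)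
            else c) := by
  induction t with
  | nil =>
    intro prev c
    simp [PySem.List.min?]
  | cons y t' ih =>
    intro prev c
    have hz : ((prev :: y :: t').zip (y :: t')) = (prev, y) :: ((y :: t').zip t') := by
      simp [List.zip]
    rw [hz, List.map_cons, pv_min?_cons2,
        ih y (if ((y : Int), prev).1 < c.1 then ((y : Int), prev) else c),
        show List.foldl min c.1 (y :: t') = t'.foldl min (min c.1 y) from rfl]
    by_cases hy : y < c.1
    · have hminc : min c.1 y = y := min_eq_right (le_of_lt hy)
      rw [hminc, if_pos (show ((y : Int), prev).1 < c.1 from hy)]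
      have hle : t'.foldl min y ≤ y := pv_foldl_min_le t' y
      by_cases h2 : t'.foldl min y < y
      · have hne : t'.foldl min y ≠ y := ne_of_lt h2
        have hlt : t'.foldl min y < c.1 := lt_trans h2 hy
        rw [if_pos h2, if_pos hlt, List.idxOf_cons]
        have hbv : (y == t'.foldl min y) = false := by
          simp only [beq_eq_false_iff_ne, ne_eq]; intro hh; exact hne hh.symm
        rw [hbv]
        simp [List.getD]
      · have hEq : t'.foldl min y = y := le_antisymm hle (not_lt.mp h2)
        rw [if_neg h2, hEq, if_pos hy, List.idxOf_cons]
        simp [List.getD]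
    · have hminc : min c.1 y = c.1 := min_eq_left (not_lt.mp hy)
      rw [hminc, if_neg (show ¬((y : Int), prev).1 < c.1 from hy)]
      by_cases h2 : t'.foldl min c.1 < c.1
      · have hlt : t'.foldl min c.1 < y := lt_of_lt_of_le h2 (not_lt.mp hy)
        have hne : t'.foldl min c.1 ≠ y := ne_of_lt hlt
        rw [if_pos h2, if_pos h2, List.idxOf_cons]
        have hbv : (y == t'.foldl min c.1) = false := by
          simp only [beq_eq_false_iff_ne, ne_eq]; intro hh; exact hne hh.symm
        rw [hbv]
        simp [List.getD]
      · rw [if_neg h2, if_neg h2]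

-- ===== VERDICT (by name: the statement is the Claim_ definition above) =====
theorem func_s5_2_spec : Claim_equal_func_s5_2 := by
  intro mas _ hpre
  unfold Spec_func_s5_2
  match mas, hpre with
  | x :: t, _ =>
    -- A side: rewrite the index fold as a fold over enumerate, then apply pv_loopA
    have hfold :
        (PySem.List.pyRange 0 (PySem.List.len (x :: t)) 1).foldl
          (fun (p : Int × Int) i =>
            if PySem.List.pyGetD (x :: t) i 0 < p.1 then (PySem.List.pyGetD (x :: t) i 0, i) else p)
          (x, 0)
        = (PySem.List.enumerate (x :: t) 0).foldl
            (fun (p : Int × Int) q => if q.2 < p.1 then (q.2, q.1) else p) (x, 0) := by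
      rw [PySem.List.enumerate_eq_map_pyRange (x :: t) 0, List.foldl_map]
    have hA : func_s5_2 (x :: t)
        = (let st := (PySem.List.enumerate (x :: t) 0).foldl
              (fun (p : Int × Int) q => if q.2 < p.1 then (q.2, q.1) else p) (x, 0)
           if st.2 = 0 then -1 else PySem.List.pyGetD (x :: t) (st.2 - 1) 0) := by
      simp only [func_s5_2, PySem.List.pyGetD_zero_cons, hfold]
    set M := t.foldl min x with hMdef
    have hMfull : (x :: t).foldl min x = M := by simp [List.foldl, hMdef]
    have hMle : M ≤ x := pv_foldl_min_le t x
    -- B side: unfold min? to its fold and apply pv_loopB with prev = x, c = (x, -1)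
    have hB : func_s5_2_alt (x :: t)
        = (if M < x then (M, (x :: t).getD (t.idxOf M) 0) else ((x : Int), (-1 : Int))).2 := by
      simp only [func_s5_2_alt]
      rw [pv_loopB t x (x, -1)]
    rw [hA, hB, pv_loopA (x :: t) 0 x 0, hMfull]
    by_cases hM : M < x
    · have hne : M ≠ x := ne_of_lt hM
      have hidx : (x :: t).idxOf M = t.idxOf M + 1 := by
        rw [List.idxOf_cons]
        have hbv : (x == M) = false := by
          simp only [beq_eq_false_iff_ne, ne_eq]; intro hh; exact hne hh.symm
        rw [hbv]
        rfl
      rw [if_pos hM, if_pos hM]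
      simp only [zero_add, hidx]
      rw [if_neg (by push_cast; omega)]
      have harg : ((List.idxOf M t + 1 : Nat) : Int) - 1 = ((List.idxOf M t : Nat) : Int) := by
        push_cast; ring
      rw [harg, PySem.List.pyGetD_natCast]
    · rw [if_neg hM, if_neg hM]
      simp
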